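-- pv_equiv track=rewrite | github.com/Eronponce/atividades-2024-01 | 01/exercises.py | count_increasing_subsets
-- ===== SOURCE A (Python) =====
-- def count_increasing_subsets(nums):
--     temp_sum = 0
--     for first_num in range(len(nums)):
--         length = 1
--         for j in range(first_num + 1, len(nums)):
--             if nums[j] > nums[j - 1]:
--                 length += 1
--             else:
--                 break
--         temp_sum += (length * (length + 1)) // 2
--     return temp_sum
-- ===== SOURCE B (Python) =====
-- def count_increasing_subsets(nums):
--     total = 0
--     run = 0
--     nxt = None
--     for x in reversed(nums):
--         run = run + 1 if nxt is not None and nxt > x else 1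
--         total += run * (run + 1) // 2
--         nxt = x
--     return total
-- ===== Notes on version B (the rewrite author's own statement) =====
-- stated objective: faster
-- what changed: Single reverse pass maintaining the current increasing-run length (run[i]=run[i+1]+1 or 1) and accumulating run*(run+1)//2, instead of rescanning the run from every start index.
import Mathlib
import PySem

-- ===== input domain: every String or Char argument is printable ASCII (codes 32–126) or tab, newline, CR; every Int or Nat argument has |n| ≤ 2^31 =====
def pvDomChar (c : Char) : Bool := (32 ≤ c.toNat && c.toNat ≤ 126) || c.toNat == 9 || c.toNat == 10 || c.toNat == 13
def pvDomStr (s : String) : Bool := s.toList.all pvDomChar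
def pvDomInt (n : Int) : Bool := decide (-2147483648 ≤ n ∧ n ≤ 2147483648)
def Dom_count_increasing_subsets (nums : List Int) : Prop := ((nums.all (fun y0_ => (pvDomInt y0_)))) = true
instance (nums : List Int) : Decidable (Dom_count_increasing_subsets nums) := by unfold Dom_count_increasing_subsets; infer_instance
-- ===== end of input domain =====

-- B replaces A's quadratic restart-a-scan-at-every-index loop by a single reverse pass
-- maintaining the current increasing-run length (objective: faster, O(n) vs O(n^2)).

-- ===== PORT A =====
-- inner 'for j in range(first_num+1, len(nums)): … else break' loop; indices are always
-- in range, so nums[j] is ported as getD (exact here).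
def innerA (nums : List Int) (j : Nat) (length : Int) : Int :=
  if j < nums.length then
    if nums.getD j 0 > nums.getD (j - 1) 0 then innerA nums (j + 1) (length + 1)
    else length
  else length
termination_by nums.length - j

def count_increasing_subsets (nums : List Int) : Int :=
  (List.range nums.length).foldl
    (fun temp_sum first_num =>
      let length := innerA nums (first_num + 1) 1
      temp_sum + PySem.Int.floordiv (length * (length + 1)) 2) 0

-- ===== PORT B =====
-- one step of B's loop over reversed(nums); state = (total, run, nxt)
def stepB (st : Int × Int × Option Int) (x : Int) : Int × Int × Option Int :=
  let run := match st.2.2 with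
    | some v => if v > x then st.2.1 + 1 else 1
    | none => 1
  (st.1 + PySem.Int.floordiv (run * (run + 1)) 2, run, some x)

def count_increasing_subsets_alt (nums : List Int) : Int :=
  (nums.reverse.foldl stepB (0, 0, none)).1

-- ===== PRECONDITION & SPEC =====
def Spec_count_increasing_subsets (nums : List Int) (out : Int) : Prop := out = count_increasing_subsets_alt nums
instance (nums : List Int) (out : Int) : Decidable (Spec_count_increasing_subsets nums out) := by unfold Spec_count_increasing_subsets; infer_instance

-- ===== CLAIM (what is proved, stated in full; the proofs are below) =====
def Claim_equal_count_increasing_subsets : Prop := ∀ (nums : List Int), Dom_count_increasing_subsets nums → Spec_count_increasing_subsets nums (count_increasing_subsets nums)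

-- ===== LEMMAS AND PROOFS =====

-- length of the maximal increasing run starting at the head
def rl : List Int → Int
  | [] => 0
  | [_] => 1
  | a :: b :: t => if b > a then rl (b :: t) + 1 else 1

def g (L : Int) : Int := PySem.Int.floordiv (L * (L + 1)) 2

-- sum of g (rl s) over all nonempty suffixes s
def T : List Int → Int
  | [] => 0
  | x :: t => T t + g (rl (x :: t))

theorem foldr_stepB (nums : List Int) :
    nums.foldr (fun x st => stepB st x) (0, 0, none) = (T nums, rl nums, nums.head?) := by
  induction nums with
  | nil => rfl
  | cons x t ih =>
    cases t with
    | nil => simp [stepB, T, rl, g]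
    | cons b t' =>
      simp only [List.foldr_cons] at ih ⊢
      rw [ih]
      simp [stepB, T, rl, g]

theorem alt_eq_T (nums : List Int) : count_increasing_subsets_alt nums = T nums := by
  unfold count_increasing_subsets_alt
  rw [List.foldl_reverse, foldr_stepB]

theorem innerA_eq (nums : List Int) : ∀ j len, 1 ≤ j → j - 1 < nums.length →
    innerA nums j len = len - 1 + rl (nums.drop (j - 1)) := by
  intro j len hj hlt
  induction j, len using innerA.induct nums with
  | case1 j len hjn hcond ih =>
    have hj1 : j - 1 < nums.length := Nat.lt_of_le_of_lt (Nat.sub_le _ _) hjn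
    rw [innerA]
    simp only [hjn, if_true, hcond, if_true]
    rw [ih (by omega) (by simpa using hjn)]
    have hdrop : nums.drop (j - 1) = nums[j-1] :: nums.drop j := by
      have h := List.drop_eq_getElem_cons hj1
      rwa [show j - 1 + 1 = j by omega] at h
    have hdrop2 : nums.drop j = nums[j] :: nums.drop (j + 1) := List.drop_eq_getElem_cons hjn
    have hgt : nums[j] > nums[j-1] := by
      have := hcond
      rwa [List.getD_eq_getElem _ _ hjn, List.getD_eq_getElem _ _ hj1] at this
    rw [hdrop, hdrop2, rl, if_pos hgt, ← hdrop2]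
    have : (j + 1) - 1 = j := by omega
    rw [this] at *
    ring
  | case2 j len hjn hcond =>
    have hj1 : j - 1 < nums.length := Nat.lt_of_le_of_lt (Nat.sub_le _ _) hjn
    rw [innerA]
    simp only [hjn, if_true, hcond, if_false]
    have hdrop : nums.drop (j - 1) = nums[j-1] :: nums.drop j := by
      have h := List.drop_eq_getElem_cons hj1
      rwa [show j - 1 + 1 = j by omega] at h
    have hdrop2 : nums.drop j = nums[j] :: nums.drop (j + 1) := List.drop_eq_getElem_cons hjn
    have hle : ¬ nums[j] > nums[j-1] := by
      have := hcond
      rwa [List.getD_eq_getElem _ _ hjn, List.getD_eq_getElem _ _ hj1] at this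
    rw [hdrop, hdrop2, rl, if_neg hle]
    ring
  | case3 j len hjn =>
    rw [innerA, if_neg hjn]
    have hjeq : j - 1 = nums.length - 1 := by omega
    have hlen : (nums.drop (j - 1)).length = 1 := by
      rw [List.length_drop]; omega
    obtain ⟨a, ha⟩ := List.length_eq_one_iff.mp hlen
    rw [ha, rl]
    ring

theorem foldl_add_map (h : Nat → Int) (l : List Nat) (a : Int) :
    l.foldl (fun acc i => acc + h i) a = a + (l.map h).sum := by
  induction l generalizing a with
  | nil => simp
  | cons x t ih => simp [ih, Int.add_assoc]

theorem sum_rl_eq_T (nums : List Int) :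
    ((List.range nums.length).map (fun i => g (rl (nums.drop i)))).sum = T nums := by
  induction nums with
  | nil => simp [T]
  | cons x t ih =>
    rw [List.length_cons, List.range_succ_eq_map]
    simp only [List.map_cons, List.map_map, List.sum_cons]
    have : ((List.range t.length).map (Function.comp (fun i => g (rl ((x :: t).drop i))) Nat.succ)).sum
        = ((List.range t.length).map (fun i => g (rl (t.drop i)))).sum := by
      apply congrArg List.sum
      apply List.map_congr_left
      intro i _
      simp [Function.comp, List.drop_succ_cons]
    rw [this, ih, T]
    simp only [List.drop_zero]
    ring

theorem A_eq_T (nums : List Int) : count_increasing_subsets nums = T nums := by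
  have h : count_increasing_subsets nums
      = (List.range nums.length).foldl (fun acc i => acc + g (innerA nums (i + 1) 1)) 0 := rfl
  rw [h, foldl_add_map (fun i => g (innerA nums (i + 1) 1)) (List.range nums.length) 0, Int.zero_add]
  rw [← sum_rl_eq_T]
  congr 1
  apply List.map_congr_left
  intro i hi
  rw [List.mem_range] at hi
  have := innerA_eq nums (i + 1) 1 (by omega) (by simpa using hi)
  simp only [Nat.add_sub_cancel] at this
  simp [g, this]

-- ===== VERDICT (by name: the statement is the Claim_ definition above) =====
theorem count_increasing_subsets_spec : Claim_equal_count_increasing_subsets := by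
  intro nums _
  unfold Spec_count_increasing_subsets
  rw [A_eq_T, alt_eq_T]
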